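-- pv_equiv track=rewrite | github.com/MalkovGN/leetcode | main.py | problem1980
-- ===== SOURCE A (Python) =====
-- def problem1980(nums):
--     binary_str = ['0'] * len(nums)
--     idx = len(nums) - 1
--
--     while ''.join(binary_str) in nums:
--         if binary_str[idx] == '0':
--             binary_str[idx] = '1'
--         else:
--             binary_str[idx] = '0'
--         if idx == 0:
--             idx += 10
--         else:
--             idx -= 1
--
--     return ''.join(binary_str)
-- ===== SOURCE B (Python) =====
-- def problem1980(nums):
--     # Build a table of which suffix-ones patterns 0^(n-k)1^k occur in nums,
--     # then return the first missing one.
--     n = len(nums)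
--     present = [False] * (n + 1)
--     for s in nums:
--         k = 0                      # length of the trailing block of '1's
--         for c in reversed(s):
--             if c != '1':
--                 break
--             k += 1
--         if k <= n and s == '0' * (n - k) + '1' * k:
--             present[k] = True
--     for k in range(n + 1):
--         if not present[k]:
--             return '0' * (n - k) + '1' * k
-- ===== Notes on version B (the rewrite author's own statement) =====
-- stated objective: alternative
-- what changed: A repeatedly generates the next candidate 0^(n-k)1^k and probes membership in nums with a linear scan per step; B makes one classifying pass over nums marking which suffix-ones patterns occur in a boolean table, then scans the table for the first missing k.
import Mathlib
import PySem

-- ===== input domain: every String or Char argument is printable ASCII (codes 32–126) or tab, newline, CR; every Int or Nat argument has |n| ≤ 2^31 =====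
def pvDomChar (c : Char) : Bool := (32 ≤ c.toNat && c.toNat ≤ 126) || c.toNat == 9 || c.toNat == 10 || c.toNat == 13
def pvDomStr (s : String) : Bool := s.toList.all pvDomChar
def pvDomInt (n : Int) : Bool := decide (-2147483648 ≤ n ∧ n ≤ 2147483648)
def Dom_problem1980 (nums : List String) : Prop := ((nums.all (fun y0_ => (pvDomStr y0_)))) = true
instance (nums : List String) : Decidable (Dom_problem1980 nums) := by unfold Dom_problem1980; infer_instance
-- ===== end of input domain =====

-- B replaces A's generate-candidate-and-probe loop by one classifying pass over nums
-- building a presence table, plus a scan for the first missing pattern (objective: alternative).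

-- ===== PORT A =====
-- ''.join(binary_str)
def pvJoin (bs : List String) : String := String.ofList (bs.flatMap String.toList)

-- binary_str[idx] = v ; exact for 0 ≤ idx < len(bs) (the only reachable case; Python raises otherwise)
def pvSetIdx (bs : List String) (idx : Int) (v : String) : List String :=
  if 0 ≤ idx ∧ idx < (bs.length : Int) then bs.set idx.toNat v else bs

-- the while loop; fuel is only a totality guard (len(nums)+1 iterations always suffice, proved below)
def pvLoopA (nums : List String) : Nat → List String → Int → String
  | 0, bs, _ => pvJoin bs
  | fuel+1, bs, idx =>
      if pvJoin bs ∈ nums then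
        let bs' := if (PySem.List.pyGet? bs idx).getD "" = "0"
                   then pvSetIdx bs idx "1" else pvSetIdx bs idx "0"
        let idx' := if idx = 0 then idx + 10 else idx - 1
        pvLoopA nums fuel bs' idx'
      else pvJoin bs

def problem1980 (nums : List String) : String :=
  pvLoopA nums (nums.length + 1) (List.replicate nums.length "0") ((nums.length : Int) - 1)

-- ===== PORT B =====
-- '0' * (n - k) + '1' * k
def pvCand (n k : Nat) : String := String.ofList (List.replicate (n - k) '0' ++ List.replicate k '1')

-- the for-with-break over reversed(s): length of the trailing block of '1's
def pvTrailOnes (l : List Char) : Nat := (l.reverse.takeWhile (fun c => c == '1')).length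

-- body of B's first loop
def pvMark (n : Nat) (present : List Bool) (s : String) : List Bool :=
  if pvTrailOnes s.toList ≤ n ∧ s = pvCand n (pvTrailOnes s.toList)
  then present.set (pvTrailOnes s.toList) true else present

def problem1980_alt (nums : List String) : String :=
  let n := nums.length
  let present := nums.foldl (pvMark n) (List.replicate (n+1) false)
  match (List.range (n+1)).find? (fun k => !(present.getD k true)) with
  | some k => pvCand n k
  | none => pvCand n (n+1)  -- unreachable (≤ n patterns can be present); Python falls off the loop

-- ===== PRECONDITION & SPEC =====
def Spec_problem1980 (nums : List String) (out : String) : Prop := out = problem1980_alt nums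
instance (nums : List String) (out : String) : Decidable (Spec_problem1980 nums out) := by unfold Spec_problem1980; infer_instance

-- ===== CLAIM (what is proved, stated in full; the proofs are below) =====
def Claim_equal_problem1980 : Prop := ∀ (nums : List String), Dom_problem1980 nums → Spec_problem1980 nums (problem1980 nums)

-- ===== LEMMAS AND PROOFS =====

-- the state of A's list after k flips
def pvBsOf (n k : Nat) : List String := List.replicate (n - k) "0" ++ List.replicate k "1"

-- A's idx after k flips (while k < n)
def pvIdxA (n k : Nat) : Int := (n : Int) - 1 - k

theorem pvFlat_rep (m : Nat) (s : String) (c : Char) (h : s.toList = [c]) :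
    (List.replicate m s).flatMap String.toList = List.replicate m c := by
  induction m with
  | zero => rfl
  | succ m ih => simp [List.replicate_succ, ih, h]

theorem pvJoin_bsOf (n k : Nat) : pvJoin (pvBsOf n k) = pvCand n k := by
  unfold pvJoin pvBsOf pvCand
  rw [List.flatMap_append, pvFlat_rep _ _ '0' (by decide), pvFlat_rep _ _ '1' (by decide)]

theorem pvCand_toList (n k : Nat) :
    (pvCand n k).toList = List.replicate (n - k) '0' ++ List.replicate k '1' :=
  String.toList_ofList

theorem pvCand_inj (n j k : Nat) (_hj : j ≤ n) (_hk : k ≤ n) (h : pvCand n j = pvCand n k) : j = k := by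
  have h' := congrArg (fun s => s.toList.count '1') h
  simp [pvCand_toList, List.count_replicate] at h'
  exact h'

theorem pvTrail_cand (n k : Nat) : pvTrailOnes (pvCand n k).toList = k := by
  unfold pvTrailOnes
  rw [pvCand_toList, List.reverse_append, List.reverse_replicate, List.reverse_replicate,
    List.takeWhile_append_of_pos (by intro a ha; simp [List.eq_of_mem_replicate ha])]
  cases hnk : n - k with
  | zero => simp
  | succ m => simp [List.replicate_succ]

theorem pvLength_mark (n : Nat) (p : List Bool) (s : String) : (pvMark n p s).length = p.length := by
  unfold pvMark; split <;> simp

theorem pvMark_getD (n : Nat) (p : List Bool) (s : String) (j : Nat)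
    (hl : p.length = n + 1) (hj : j ≤ n) :
    (pvMark n p s).getD j true = (p.getD j true || decide (pvCand n j = s)) := by
  have hjlen : j < p.length := by omega
  unfold pvMark
  split
  · rename_i hc
    obtain ⟨hk, hs⟩ := hc
    by_cases hje : j = pvTrailOnes s.toList
    · subst hje
      rw [List.getD_eq_getElem _ _ (by simpa using hjlen), List.getElem_set_self]
      simp [← hs]
    · rw [List.getD_eq_getElem _ _ (by simpa using hjlen),
        List.getElem_set_ne (by omega), ← List.getD_eq_getElem _ true hjlen]
      have : ¬ (pvCand n j = s) := by
        intro he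
        exact hje (pvCand_inj n j _ hj hk (he.trans hs))
      simp [this]
  · rename_i hc
    have : ¬ (pvCand n j = s) := by
      intro he
      have ht : pvTrailOnes s.toList = j := by rw [← he, pvTrail_cand]
      exact hc (by rw [ht]; exact ⟨hj, he.symm⟩)
    simp [this]

theorem pvFold_getD (n : Nat) (l : List String) : ∀ (p : List Bool), p.length = n + 1 →
    ∀ j ≤ n, (l.foldl (pvMark n) p).getD j true = (p.getD j true || decide (pvCand n j ∈ l)) := by
  induction l with
  | nil => intro p _ j _; simp
  | cons s t ih =>
    intro p hl j hj
    rw [List.foldl_cons, ih _ (by rw [pvLength_mark]; exact hl) j hj,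
      pvMark_getD n p s j hl hj]
    simp [List.mem_cons, Bool.or_assoc]

theorem pvExistsMissing (nums : List String) :
    ∃ j, j ≤ nums.length ∧ pvCand nums.length j ∉ nums := by
  by_contra h
  push Not at h
  set n := nums.length with hn
  have hsub : (List.range (n+1)).map (pvCand n) ⊆ nums := by
    intro x hx
    obtain ⟨j, hj, rfl⟩ := List.mem_map.1 hx
    exact h j (by have := List.mem_range.1 hj; omega)
  have hnd : ((List.range (n+1)).map (pvCand n)).Nodup := by
    refine (List.nodup_range).map_on ?_
    intro a ha b hb hab
    exact pvCand_inj n a b (by have := List.mem_range.1 ha; omega)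
      (by have := List.mem_range.1 hb; omega) hab
  have := (hnd.subperm hsub).length_le
  rw [← hn] at this
  simp at this

theorem pvExistsNotMem (nums : List String) : ∃ j, pvCand nums.length j ∉ nums := by
  obtain ⟨j, _, hj⟩ := pvExistsMissing nums
  exact ⟨j, hj⟩

-- the least k whose pattern is absent
def pvK (nums : List String) : Nat := Nat.find (pvExistsNotMem nums)

theorem pvK_le (nums : List String) : pvK nums ≤ nums.length := by
  obtain ⟨j, hjn, hj⟩ := pvExistsMissing nums
  exact le_trans (Nat.find_le hj) hjn

theorem pvK_spec (nums : List String) : pvCand nums.length (pvK nums) ∉ nums :=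
  Nat.find_spec (pvExistsNotMem nums)

theorem pvK_min (nums : List String) (j : Nat) (hj : j < pvK nums) :
    pvCand nums.length j ∈ nums := by
  have := Nat.find_min (pvExistsNotMem nums) hj
  simpa using this

theorem pvFind?_range' (p : Nat → Bool) (K : Nat) : ∀ (len s : Nat), s ≤ K → K < s + len →
    p K = true → (∀ j, s ≤ j → j < K → p j = false) →
    (List.range' s len).find? p = some K := by
  intro len
  induction len with
  | zero => intro s _ h; omega
  | succ m ih =>
    intro s hs hlt hK hlow
    rw [List.range'_succ, List.find?_cons]
    by_cases hsk : s = K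
    · subst hsk; simp [hK]
    · rw [hlow s le_rfl (by omega)]
      exact ih (s+1) (by omega) (by omega) hK (fun j h1 h2 => hlow j (by omega) h2)

theorem pvAlt_eq (nums : List String) :
    problem1980_alt nums = pvCand nums.length (pvK nums) := by
  unfold problem1980_alt
  have hn : nums.length = nums.length := rfl
  have hget : ∀ j ≤ nums.length,
      (nums.foldl (pvMark nums.length) (List.replicate (nums.length+1) false)).getD j true
      = decide (pvCand nums.length j ∈ nums) := by
    intro j hj
    rw [pvFold_getD nums.length nums _ (by simp) j hj,
      List.getD_eq_getElem _ true (by simp; omega)]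
    simp
  have hfind : (List.range (nums.length+1)).find?
      (fun k => !((nums.foldl (pvMark nums.length) (List.replicate (nums.length+1) false)).getD k true))
      = some (pvK nums) := by
    rw [List.range_eq_range']
    refine pvFind?_range' _ (pvK nums) (nums.length+1) 0 (by omega)
      (by have := pvK_le nums; omega) ?_ ?_
    · rw [hget _ (pvK_le nums)]
      simp [pvK_spec nums]
    · intro j _ hjK
      rw [hget j (by have := pvK_le nums; omega)]
      simp [pvK_min nums j hjK]
  simp only [hfind]

theorem pvPyGet_bsOf (n k : Nat) (hk : k < n) :
    PySem.List.pyGet? (pvBsOf n k) (pvIdxA n k) = some "0" := by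
  have hidx : pvIdxA n k = ((n - 1 - k : Nat) : Int) := by unfold pvIdxA; omega
  rw [hidx, PySem.List.pyGet?_natCast]
  unfold pvBsOf
  rw [List.getElem?_eq_getElem (by simp; omega)]
  rw [List.getElem_append_left (by simp; omega)]
  simp

theorem pvSet_replicate_last (m : Nat) (a b : String) :
    (List.replicate (m+1) a).set m b = List.replicate m a ++ [b] := by
  induction m with
  | zero => rfl
  | succ m ih => rw [List.replicate_succ, List.set_cons_succ, ih, List.replicate_succ]; rfl

theorem pvSet_bsOf (n k : Nat) (hk : k < n) :
    pvSetIdx (pvBsOf n k) (pvIdxA n k) "1" = pvBsOf n (k+1) := by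
  have hlen : (pvBsOf n k).length = n := by unfold pvBsOf; simp; omega
  unfold pvSetIdx
  rw [if_pos (by rw [hlen]; unfold pvIdxA; constructor <;> omega)]
  have htn : (pvIdxA n k).toNat = n - 1 - k := by unfold pvIdxA; omega
  rw [htn]
  unfold pvBsOf
  rw [List.set_append_left _ _ (by simp; omega)]
  have h1 : n - k = (n - 1 - k) + 1 := by omega
  rw [h1, pvSet_replicate_last, List.append_assoc]
  have h2 : ("1" : String) :: List.replicate k "1" = List.replicate (k+1) "1" := by
    rw [List.replicate_succ]
  have h3 : n - 1 - k = n - (k+1) := by omega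
  rw [List.singleton_append, h2, h3]

theorem pvLoop_run (nums : List String) : ∀ (d k : Nat) (idx : Int), k ≤ pvK nums →
    pvK nums - k = d → (k < pvK nums → idx = pvIdxA nums.length k) →
    pvLoopA nums (nums.length + 1 - k) (pvBsOf nums.length k) idx
      = pvCand nums.length (pvK nums) := by
  intro d
  induction d with
  | zero =>
    intro k idx hk hd _
    have hkK : k = pvK nums := by omega
    have hfuel : nums.length + 1 - k = (nums.length - k) + 1 := by
      have := pvK_le nums; omega
    rw [hfuel, pvLoopA, pvJoin_bsOf, hkK, if_neg (pvK_spec nums)]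
  | succ d ih =>
    intro k idx hk hd hidx
    have hkK : k < pvK nums := by omega
    have hkn : k < nums.length := lt_of_lt_of_le hkK (pvK_le nums)
    have hfuel : nums.length + 1 - k = (nums.length - k) + 1 := by omega
    rw [hfuel, pvLoopA, pvJoin_bsOf, if_pos (pvK_min nums k hkK)]
    rw [hidx hkK, pvPyGet_bsOf _ _ hkn]
    simp only [Option.getD_some, pvSet_bsOf _ _ hkn]
    have hcall : nums.length - k = nums.length + 1 - (k+1) := by omega
    rw [hcall]
    refine ih (k+1) _ (by omega) (by omega) ?_
    intro hk1
    have hk1n : k + 1 < nums.length := lt_of_lt_of_le hk1 (pvK_le nums)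
    have hne : pvIdxA nums.length k ≠ 0 := by unfold pvIdxA; omega
    rw [if_neg hne]
    unfold pvIdxA; omega

-- ===== VERDICT (by name: the statement is the Claim_ definition above) =====
theorem problem1980_spec : Claim_equal_problem1980 := by
  intro nums _
  unfold Spec_problem1980 problem1980
  rw [pvAlt_eq]
  have hbs : List.replicate nums.length "0" = pvBsOf nums.length 0 := by
    unfold pvBsOf; simp
  have hfuel : nums.length + 1 = nums.length + 1 - 0 := rfl
  rw [hbs, hfuel]
  refine pvLoop_run nums (pvK nums) 0 _ (by omega) (by omega) ?_
  intro _
  unfold pvIdxA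
  omega
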